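-- pv_equiv track=rewrite | github.com/sthcst/Course-Scheduler | ml_trainer/constraint_optimizer.py | _prerequisites_satisfied_in_semester_dict
-- ===== SOURCE A (Python) =====
-- from typing import Dict, List, Set, Tuple, Optional
--
-- def _prerequisites_satisfied_in_semester_dict(course: Dict, scheduled_semesters: List[Dict],
--                                              semester_idx: int) -> bool:
--     """Check if prerequisites are satisfied for a course in a specific semester"""
--     if not course.get("prerequisites"):
--         return True
--
--     # Get all courses scheduled before this semester
--     scheduled_before = []
--     for i in range(semester_idx):
--         for c in scheduled_semesters[i]["classes"]:
--             scheduled_before.append(c["id"])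
--
--     return all(prereq_id in scheduled_before for prereq_id in course["prerequisites"])
-- ===== SOURCE B (Python) =====
-- def _prerequisites_satisfied_in_semester_dict(course, scheduled_semesters,
--                                               semester_idx):
--     """Check if prerequisites are satisfied for a course in a specific semester"""
--     # Worklist of prerequisites still missing; walk the earlier semesters,
--     # discarding each scheduled id, and stop as soon as nothing is missing.
--     pending = set(course.get("prerequisites") or ())
--     i = 0
--     while pending and i < semester_idx:
--         for c in scheduled_semesters[i]["classes"]:
--             pending.discard(c["id"])
--         i += 1
--     return not pending
-- ===== Notes on version B (the rewrite author's own statement) =====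
-- stated objective: alternative
-- what changed: B inverts A's collect-then-check scheme: instead of building one scheduled_before list and then membership-testing every prerequisite against it, B keeps a shrinking worklist set of still-missing prerequisites, discards each earlier-semester id from it while walking the semesters, and stops early once the set is empty.
import Mathlib
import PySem

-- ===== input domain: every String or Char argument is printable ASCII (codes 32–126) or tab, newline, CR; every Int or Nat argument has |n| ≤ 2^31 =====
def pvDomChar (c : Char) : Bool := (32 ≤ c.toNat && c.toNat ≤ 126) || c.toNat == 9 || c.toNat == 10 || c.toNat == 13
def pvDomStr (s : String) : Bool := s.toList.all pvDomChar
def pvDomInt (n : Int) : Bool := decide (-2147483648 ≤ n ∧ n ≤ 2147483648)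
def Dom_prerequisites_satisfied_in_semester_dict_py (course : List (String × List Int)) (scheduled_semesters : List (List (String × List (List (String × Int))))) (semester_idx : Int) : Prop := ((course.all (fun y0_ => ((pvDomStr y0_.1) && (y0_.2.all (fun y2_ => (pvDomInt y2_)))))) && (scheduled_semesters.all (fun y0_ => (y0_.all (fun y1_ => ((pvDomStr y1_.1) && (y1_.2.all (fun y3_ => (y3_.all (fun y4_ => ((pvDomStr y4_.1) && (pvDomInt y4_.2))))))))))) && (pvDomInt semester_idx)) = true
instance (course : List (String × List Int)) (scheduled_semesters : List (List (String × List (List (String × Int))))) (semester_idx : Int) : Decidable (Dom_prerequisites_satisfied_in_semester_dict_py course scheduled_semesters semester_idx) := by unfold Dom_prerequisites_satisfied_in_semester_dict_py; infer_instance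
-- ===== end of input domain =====

-- B replaces A's collect-then-check pre-pass (one combined list of earlier course ids,
-- then per-prerequisite membership tests) with a shrinking worklist set of missing
-- prerequisites discarded while walking the earlier semesters, with early exit.


-- Python dict access d[k] / d.get(k) on an insertion-ordered assoc list: first match.
def pvLookup {α : Type} (d : List (String × α)) (k : String) : Option α :=
  (d.find? (fun p => p.1 == k)).map (·.2)

-- ===== PORT A =====
def prerequisites_satisfied_in_semester_dict_py (course : List (String × List Int)) (scheduled_semesters : List (List (String × List (List (String × Int))))) (semester_idx : Int) : Bool :=
  match pvLookup course "prerequisites" with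
  | none => true                                  -- course.get(...) is None → falsy
  | some prereqs =>
    if prereqs.isEmpty then true                  -- empty list → falsy
    else
      -- scheduled_before: append the id of every class of every earlier semester
      let scheduled_before :=
        (PySem.List.pyRange 0 semester_idx 1).foldl (fun acc i =>
          match PySem.List.pyGet? scheduled_semesters i with
          | none => acc                           -- IndexError: excluded by Pre_
          | some sem =>
            match pvLookup sem "classes" with
            | none => acc                         -- KeyError: excluded by Pre_
            | some classes =>
              classes.foldl (fun acc2 c =>
                match pvLookup c "id" with
                | none => acc2                    -- KeyError: excluded by Pre_
                | some cid => acc2 ++ [cid]) acc) []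
      prereqs.all (fun p => scheduled_before.contains p)

-- ===== PORT B =====
-- the while loop of Source B: pending is the set of still-missing prerequisites,
-- rem counts the remaining loop iterations (semester_idx - i), i the current index
def pvPendingLoop (scheduled_semesters : List (List (String × List (List (String × Int))))) (rem : Nat) (i : Int) (pending : PySem.Set Int) : PySem.Set Int :=
  match rem with
  | 0 => pending
  | Nat.succ r =>
    if pending.isEmpty then pending               -- while condition: pending became empty
    else
      let pending' :=
        match PySem.List.pyGet? scheduled_semesters i with
        | none => pending                         -- IndexError: excluded by Pre_
        | some sem =>
          match pvLookup sem "classes" with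
          | none => pending                       -- KeyError: excluded by Pre_
          | some classes =>
            classes.foldl (fun acc c =>
              match pvLookup c "id" with
              | none => acc                       -- KeyError: excluded by Pre_
              | some cid => PySem.Set.discard acc cid) pending
      pvPendingLoop scheduled_semesters r (i + 1) pending'

def prerequisites_satisfied_in_semester_dict_py_alt (course : List (String × List Int)) (scheduled_semesters : List (List (String × List (List (String × Int))))) (semester_idx : Int) : Bool :=
  -- pending = set(course.get("prerequisites") or ())
  let pending := PySem.Set.ofList ((pvLookup course "prerequisites").getD [])
  (pvPendingLoop scheduled_semesters semester_idx.toNat 0 pending).isEmpty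

-- ===== PRECONDITION & SPEC =====
-- Pre_ excludes exactly the inputs on which Python A RAISES (IndexError when
-- semester_idx exceeds len(scheduled_semesters), KeyError on a missing "classes"
-- or "id" key in an accessed semester) — A returns on every other input.
def Pre_prerequisites_satisfied_in_semester_dict_py (course : List (String × List Int)) (scheduled_semesters : List (List (String × List (List (String × Int))))) (semester_idx : Int) : Prop :=
  (pvLookup course "prerequisites").getD [] ≠ [] →
    (semester_idx ≤ (scheduled_semesters.length : Int) ∧
     ∀ sem ∈ scheduled_semesters.take semester_idx.toNat,
       (pvLookup sem "classes").isSome = true ∧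
       ∀ c ∈ (pvLookup sem "classes").getD [], (pvLookup c "id").isSome = true)
instance (course : List (String × List Int)) (scheduled_semesters : List (List (String × List (List (String × Int))))) (semester_idx : Int) : Decidable (Pre_prerequisites_satisfied_in_semester_dict_py course scheduled_semesters semester_idx) := by unfold Pre_prerequisites_satisfied_in_semester_dict_py; infer_instance

def pvWitness_prerequisites_satisfied_in_semester_dict_py : (List (String × List Int)) × (List (List (String × List (List (String × Int))))) × Int :=
  ([("prerequisites", [1])], [[("classes", [[("id", 1)]])]], 1)

def Spec_prerequisites_satisfied_in_semester_dict_py (course : List (String × List Int)) (scheduled_semesters : List (List (String × List (List (String × Int))))) (semester_idx : Int) (out : Bool) : Prop := out = prerequisites_satisfied_in_semester_dict_py_alt course scheduled_semesters semester_idx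
instance (course : List (String × List Int)) (scheduled_semesters : List (List (String × List (List (String × Int))))) (semester_idx : Int) (out : Bool) : Decidable (Spec_prerequisites_satisfied_in_semester_dict_py course scheduled_semesters semester_idx out) := by unfold Spec_prerequisites_satisfied_in_semester_dict_py; infer_instance

-- ===== CLAIM (what is proved, stated in full; the proofs are below) =====
def Claim_equal_prerequisites_satisfied_in_semester_dict_py : Prop := ∀ (course : List (String × List Int)) (scheduled_semesters : List (List (String × List (List (String × Int))))) (semester_idx : Int), Dom_prerequisites_satisfied_in_semester_dict_py course scheduled_semesters semester_idx → Pre_prerequisites_satisfied_in_semester_dict_py course scheduled_semesters semester_idx → Spec_prerequisites_satisfied_in_semester_dict_py course scheduled_semesters semester_idx (prerequisites_satisfied_in_semester_dict_py course scheduled_semesters semester_idx)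

-- ===== LEMMAS AND PROOFS =====

-- the ids one semester contributes
def pvSemIds (scheduled_semesters : List (List (String × List (List (String × Int))))) (i : Int) : List Int :=
  match PySem.List.pyGet? scheduled_semesters i with
  | none => []
  | some sem =>
    match pvLookup sem "classes" with
    | none => []
    | some classes => classes.filterMap (fun c => pvLookup c "id")

-- the ids of semesters i, i+1, …, i+rem-1
def pvIdsFrom (scheduled_semesters : List (List (String × List (List (String × Int))))) (i : Int) (rem : Nat) : List Int :=
  match rem with
  | 0 => []
  | Nat.succ r => pvSemIds scheduled_semesters i ++ pvIdsFrom scheduled_semesters (i + 1) r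

theorem pv_inner_foldl (classes : List (List (String × Int))) (acc : List Int) :
    classes.foldl (fun acc2 c =>
      match pvLookup c "id" with
      | none => acc2
      | some cid => acc2 ++ [cid]) acc
    = acc ++ classes.filterMap (fun c => pvLookup c "id") := by
  induction classes generalizing acc with
  | nil => simp
  | cons c cs ih =>
    cases h : pvLookup c "id" <;> simp [List.foldl_cons, h, ih]

theorem pv_outer_foldl (scheduled_semesters : List (List (String × List (List (String × Int))))) (l : List Int) (acc : List Int) :
    l.foldl (fun acc i =>
      match PySem.List.pyGet? scheduled_semesters i with
      | none => acc
      | some sem =>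
        match pvLookup sem "classes" with
        | none => acc
        | some classes =>
          classes.foldl (fun acc2 c =>
            match pvLookup c "id" with
            | none => acc2
            | some cid => acc2 ++ [cid]) acc) acc
    = acc ++ l.flatMap (pvSemIds scheduled_semesters) := by
  induction l generalizing acc with
  | nil => simp
  | cons i is ih =>
    simp only [List.foldl_cons, List.flatMap_cons]
    cases h1 : PySem.List.pyGet? scheduled_semesters i with
    | none => simp [ih, pvSemIds, h1]
    | some sem =>
      cases h2 : pvLookup sem "classes" with
      | none => simp [ih, pvSemIds, h1, h2]
      | some classes =>
        rw [ih]
        simp [pv_inner_foldl, pvSemIds, h1, h2]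

-- the per-semester class fold of B = folding discard over that semester's ids
theorem pv_class_fold (classes : List (List (String × Int))) (pending : List Int) :
    classes.foldl (fun acc c =>
      match pvLookup c "id" with
      | none => acc
      | some cid => PySem.Set.discard acc cid) pending
    = pending.filter (fun p => !(classes.filterMap (fun c => pvLookup c "id")).contains p) := by
  induction classes generalizing pending with
  | nil => simp
  | cons c cs ih =>
    cases h : pvLookup c "id" with
    | none => simp [List.foldl_cons, h, ih]
    | some cid =>
      rw [List.foldl_cons, h, ih]
      simp only [PySem.Set.discard, List.filter_filter, List.filterMap_cons, h,
        List.contains_cons]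
      apply List.filter_congr
      intro p _
      by_cases hp : p = cid <;> simp [hp, Bool.and_comm]

-- the loop invariant: the loop keeps exactly the prerequisites not scheduled so far
theorem pv_loop_filter (scheduled_semesters : List (List (String × List (List (String × Int))))) (rem : Nat) (i : Int) (pending : List Int) :
    pvPendingLoop scheduled_semesters rem i pending
    = pending.filter (fun p => !(pvIdsFrom scheduled_semesters i rem).contains p) := by
  induction rem generalizing i pending with
  | zero => simp [pvPendingLoop, pvIdsFrom]
  | succ r ih =>
    rw [pvPendingLoop]
    by_cases hemp : pending.isEmpty
    · rw [List.isEmpty_iff] at hemp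
      simp [hemp]
    · simp only [hemp, Bool.false_eq_true, if_false]
      have step :
          (match PySem.List.pyGet? scheduled_semesters i with
            | none => pending
            | some sem =>
              match pvLookup sem "classes" with
              | none => pending
              | some classes =>
                classes.foldl (fun acc c =>
                  match pvLookup c "id" with
                  | none => acc
                  | some cid => PySem.Set.discard acc cid) pending)
          = pending.filter (fun p => !(pvSemIds scheduled_semesters i).contains p) := by
        cases h1 : PySem.List.pyGet? scheduled_semesters i with
        | none => simp [pvSemIds, h1]
        | some sem =>
          cases h2 : pvLookup sem "classes" with
          | none => simp [pvSemIds, h1, h2]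
          | some classes => simp [pvSemIds, h1, h2, pv_class_fold]
      rw [step, ih, List.filter_filter]
      apply List.filter_congr
      intro p _
      simp only [pvIdsFrom, List.contains_append]
      by_cases h : (pvSemIds scheduled_semesters i).contains p <;> simp [Bool.and_comm]

-- pvIdsFrom over the whole range = the flatMap A builds
theorem pv_idsFrom_range (scheduled_semesters : List (List (String × List (List (String × Int))))) (rem : Nat) (i : Int) :
    pvIdsFrom scheduled_semesters i rem
    = (PySem.List.pyRange i (i + rem) 1).flatMap (pvSemIds scheduled_semesters) := by
  induction rem generalizing i with
  | zero => simp [pvIdsFrom, PySem.List.pyRange_one_eq_nil]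
  | succ r ih =>
    have hlt : i < i + (r + 1 : Nat) := by push_cast; omega
    rw [PySem.List.pyRange_one_cons hlt, List.flatMap_cons, pvIdsFrom, ih]
    have h2 : i + ((r + 1 : Nat) : Int) = (i + 1) + (r : Nat) := by push_cast; ring
    rw [h2]

theorem pv_idsFrom_eq (scheduled_semesters : List (List (String × List (List (String × Int))))) (semester_idx : Int) :
    pvIdsFrom scheduled_semesters 0 semester_idx.toNat
    = (PySem.List.pyRange 0 semester_idx 1).flatMap (pvSemIds scheduled_semesters) := by
  rcases le_or_gt semester_idx 0 with h | h
  · rw [PySem.List.pyRange_one_eq_nil h]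
    have : semester_idx.toNat = 0 := by omega
    simp [this, pvIdsFrom]
  · have : (0 : Int) + semester_idx.toNat = semester_idx := by omega
    rw [pv_idsFrom_range, this]

theorem prerequisites_ports_agree (course : List (String × List Int)) (scheduled_semesters : List (List (String × List (List (String × Int))))) (semester_idx : Int) :
    prerequisites_satisfied_in_semester_dict_py course scheduled_semesters semester_idx
    = prerequisites_satisfied_in_semester_dict_py_alt course scheduled_semesters semester_idx := by
  unfold prerequisites_satisfied_in_semester_dict_py prerequisites_satisfied_in_semester_dict_py_alt
  dsimp only
  rw [pv_loop_filter, pv_idsFrom_eq]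
  set ids := (PySem.List.pyRange 0 semester_idx 1).flatMap (pvSemIds scheduled_semesters) with hids
  cases hp : pvLookup course "prerequisites" with
  | none => simp
  | some prereqs =>
    simp only [Option.getD_some]
    by_cases he : prereqs.isEmpty
    · rw [List.isEmpty_iff] at he
      simp [he]
    · simp only [he, Bool.false_eq_true, if_false]
      rw [pv_outer_foldl, List.nil_append, ← hids, Bool.eq_iff_iff,
        List.all_eq_true, List.isEmpty_iff, List.filter_eq_nil_iff]
      constructor
      · intro h p hp'
        have := h p ((PySem.Set.mem_ofList _ _).mp hp')
        simpa using this
      · intro h p hp'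
        have := h p ((PySem.Set.mem_ofList _ _).mpr hp')
        simpa using this

-- ===== VERDICT (by name: the statement is the Claim_ definition above) =====
theorem prerequisites_satisfied_in_semester_dict_py_spec : Claim_equal_prerequisites_satisfied_in_semester_dict_py := by
  intro course scheduled_semesters semester_idx _ _
  unfold Spec_prerequisites_satisfied_in_semester_dict_py
  exact prerequisites_ports_agree course scheduled_semesters semester_idx
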